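-- pv_equiv track=rewrite | github.com/Erix025/matheval | evaluate.py | parse_k_values
-- ===== SOURCE A (Python) =====
-- from typing import Any, Dict, List, Optional, Sequence, Tuple
--
-- def parse_k_values(raw_values: Sequence[int]) -> List[int]:
--     if not raw_values:
--         raise ValueError("At least one value must be provided to --pass-k.")
--     seen = set()
--     result: List[int] = []
--     for value in sorted(raw_values):
--         if value in seen:
--             continue
--         if value <= 0:
--             raise ValueError("pass@k values must be positive integers.")
--         seen.add(value)
--         result.append(value)
--     return result
-- ===== SOURCE B (Python) =====
-- def _qsort_unique(vals):
--     # quicksort-style divide and conquer that deduplicates by emitting the pivot once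
--     if not vals:
--         return []
--     pivot = vals[0]
--     return (_qsort_unique([v for v in vals if v < pivot])
--             + [pivot]
--             + _qsort_unique([v for v in vals if v > pivot]))
--
-- def parse_k_values(raw_values):
--     if not raw_values:
--         raise ValueError("At least one value must be provided to --pass-k.")
--     if min(raw_values) <= 0:
--         raise ValueError("pass@k values must be positive integers.")
--     return _qsort_unique(list(raw_values))
-- ===== Notes on version B (the rewrite author's own statement) =====
-- stated objective: alternative
-- what changed: Replaces A's sort-then-scan with a seen set by a recursive quicksort-style divide and conquer that deduplicates structurally (each pivot is emitted exactly once, duplicates vanish in the partition), with positivity validated upfront via min().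
import Mathlib
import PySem

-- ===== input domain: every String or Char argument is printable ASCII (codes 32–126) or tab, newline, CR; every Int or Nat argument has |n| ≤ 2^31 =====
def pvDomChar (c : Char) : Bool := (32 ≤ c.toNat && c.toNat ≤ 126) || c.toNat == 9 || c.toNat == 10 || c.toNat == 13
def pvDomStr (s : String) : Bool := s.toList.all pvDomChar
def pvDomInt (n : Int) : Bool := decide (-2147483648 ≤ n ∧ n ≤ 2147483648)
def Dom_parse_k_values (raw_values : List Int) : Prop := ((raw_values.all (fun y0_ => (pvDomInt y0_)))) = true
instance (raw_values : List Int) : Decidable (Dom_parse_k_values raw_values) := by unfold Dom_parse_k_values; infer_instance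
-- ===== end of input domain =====

-- B replaces A's sort-then-scan-with-seen-set by a recursive quicksort-style divide and
-- conquer that deduplicates structurally (each pivot emitted once), with positivity checked
-- upfront via min (objective: alternative). Both Pythons raise ValueError exactly on the
-- inputs Pre_ excludes (empty input, or a value ≤ 0).

-- ===== PORT A =====
-- literal port of A: sort, then fold carrying (seen, result); the two 'raise' sites
-- return [] — they are exactly the inputs excluded by Pre_.
def parse_k_values (raw_values : List Int) : List Int :=
  if raw_values = [] then []  -- raise ValueError (outside Pre_)
  else
    ((PySem.List.sorted raw_values (fun x => x) false).foldl
      (fun (st : PySem.Set Int × List Int) value =>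
        if PySem.Set.contains st.1 value then st
        else if value ≤ 0 then st  -- raise ValueError (outside Pre_)
        else (PySem.Set.add st.1 value, st.2 ++ [value]))
      (PySem.Set.empty, [])).2

-- ===== PORT B =====
-- quicksort-with-dedup helper of Source B, step for step
def qsortUnique : List Int → List Int
  | [] => []
  | p :: rest =>
    qsortUnique (List.filter (fun v => decide (v < p)) (p :: rest)) ++
      p :: qsortUnique (List.filter (fun v => decide (p < v)) (p :: rest))
  termination_by l => l.length
  decreasing_by
  · simp only [List.filter_cons, decide_eq_true_eq, lt_irrefl, if_false, List.length_cons]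
    exact Nat.lt_succ_of_le (List.length_filter_le _ _)
  · simp only [List.filter_cons, decide_eq_true_eq, lt_irrefl, if_false, List.length_cons]
    exact Nat.lt_succ_of_le (List.length_filter_le _ _)

def parse_k_values_alt (raw_values : List Int) : List Int :=
  if raw_values = [] then []  -- raise ValueError (outside Pre_)
  else
    match PySem.List.min? raw_values (fun x => x) with
    | none => []  -- unreachable: list nonempty
    | some m => if m ≤ 0 then []  -- raise ValueError (outside Pre_)
                else qsortUnique raw_values

-- ===== PRECONDITION & SPEC =====
-- Pre_ excludes exactly the inputs on which Python A raises ValueError: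
-- the empty list, and lists containing a value ≤ 0.
def Pre_parse_k_values (raw_values : List Int) : Prop :=
  raw_values ≠ [] ∧ ∀ x ∈ raw_values, 0 < x
instance (raw_values : List Int) : Decidable (Pre_parse_k_values raw_values) := by
  unfold Pre_parse_k_values; infer_instance
def pvWitness_parse_k_values : List Int := [3, 1, 2, 2]

def Spec_parse_k_values (raw_values : List Int) (out : List Int) : Prop := out = parse_k_values_alt raw_values
instance (raw_values : List Int) (out : List Int) : Decidable (Spec_parse_k_values raw_values out) := by unfold Spec_parse_k_values; infer_instance

-- ===== CLAIM (what is proved, stated in full; the proofs are below) =====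
def Claim_equal_parse_k_values : Prop := ∀ (raw_values : List Int), Dom_parse_k_values raw_values → Pre_parse_k_values raw_values → Spec_parse_k_values raw_values (parse_k_values raw_values)

-- ===== LEMMAS AND PROOFS =====

-- membership in the quicksort result is membership in the input
lemma mem_qsortUnique (l : List Int) (a : Int) : a ∈ qsortUnique l ↔ a ∈ l := by
  induction l using qsortUnique.induct with
  | case1 => simp [qsortUnique]
  | case2 p rest ih1 ih2 =>
    rw [qsortUnique]
    simp only [List.mem_append, List.mem_cons, ih1, ih2, List.mem_filter,
      decide_eq_true_eq]
    constructor
    · rintro (⟨h, _⟩ | h | ⟨h, _⟩) <;> simp_all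
    · intro h
      rcases lt_trichotomy a p with hlt | heq | hgt
      · exact Or.inl ⟨by simpa using h, hlt⟩
      · exact Or.inr (Or.inl heq)
      · exact Or.inr (Or.inr ⟨by simpa using h, hgt⟩)

-- the quicksort result is strictly increasing
lemma pairwise_qsortUnique (l : List Int) : (qsortUnique l).Pairwise (· < ·) := by
  induction l using qsortUnique.induct with
  | case1 => simp [qsortUnique]
  | case2 p rest ih1 ih2 =>
    rw [qsortUnique]
    rw [List.pairwise_append]
    refine ⟨ih1, ?_, ?_⟩
    · rw [List.pairwise_cons]
      refine ⟨?_, ih2⟩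
      intro b hb
      have := (mem_qsortUnique _ b).1 hb
      simp only [List.mem_filter, decide_eq_true_eq] at this
      exact this.2
    · intro a ha b hb
      have ha' := (mem_qsortUnique _ a).1 ha
      simp only [List.mem_filter, decide_eq_true_eq] at ha'
      rcases List.mem_cons.1 hb with hb | hb
      · subst hb; exact ha'.2
      · have hb' := (mem_qsortUnique _ b).1 hb
        simp only [List.mem_filter, decide_eq_true_eq] at hb'
        exact ha'.2.trans hb'.2

-- A's fold, when every element is positive, is exactly building set(ys) in first-occurrence
-- order (the result list evolves identically to the seen set).
lemma loopA_eq_foldl_add (ys : List Int) (h : ∀ v ∈ ys, 0 < v) (s : List Int) :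
    (ys.foldl
      (fun (st : PySem.Set Int × List Int) value =>
        if PySem.Set.contains st.1 value then st
        else if value ≤ 0 then st
        else (PySem.Set.add st.1 value, st.2 ++ [value]))
      (s, s)) = (ys.foldl PySem.Set.add s, ys.foldl PySem.Set.add s) := by
  induction ys generalizing s with
  | nil => rfl
  | cons y ys ih =>
    have hy : 0 < y := h y (List.mem_cons_self)
    have hrest : ∀ v ∈ ys, 0 < v := fun v hv => h v (List.mem_cons_of_mem _ hv)
    simp only [List.foldl_cons]
    by_cases hc : PySem.Set.contains s y
    · have hadd : PySem.Set.add s y = s := by unfold PySem.Set.add; rw [if_pos hc]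
      simp only [hc, if_true, hadd]
      exact ih hrest s
    · have hadd : PySem.Set.add s y = s ++ [y] := by unfold PySem.Set.add; rw [if_neg hc]
      simp only [hc, if_neg (by omega : ¬ y ≤ 0), hadd]
      exact ih hrest (s ++ [y])

-- foldl Set.add over ys produces a sublist of s ++ ys
lemma foldl_add_sublist (ys : List Int) (s : List Int) :
    List.Sublist (ys.foldl PySem.Set.add s) (s ++ ys) := by
  induction ys generalizing s with
  | nil => simp
  | cons y ys ih =>
    simp only [List.foldl_cons]
    by_cases hc : PySem.Set.contains s y
    · have : PySem.Set.add s y = s := by unfold PySem.Set.add; rw [if_pos hc]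
      rw [this]
      exact (ih s).trans (List.Sublist.append_left (List.sublist_cons_self y ys) s)
    · have : PySem.Set.add s y = s ++ [y] := by unfold PySem.Set.add; rw [if_neg hc]
      rw [this]
      have := ih (s ++ [y])
      simpa using this

-- two strictly increasing integer lists with the same members are equal
lemma eq_of_mem_iff_pairwise_lt (l1 l2 : List Int)
    (hm : ∀ a, a ∈ l1 ↔ a ∈ l2)
    (h1 : l1.Pairwise (· < ·)) (h2 : l2.Pairwise (· < ·)) : l1 = l2 := by
  have hn1 : l1.Nodup := h1.imp ne_of_lt
  have hn2 : l2.Nodup := h2.imp ne_of_lt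
  have hperm : List.Perm l1 l2 := (List.perm_ext_iff_of_nodup hn1 hn2).2 hm
  exact hperm.eq_of_pairwise (fun a b _ _ ha hb => absurd hb (not_lt.2 ha.le)) h1 h2

-- ===== VERDICT (by name: the statement is the Claim_ definition above) =====
theorem parse_k_values_spec : Claim_equal_parse_k_values := by
  intro raw _hdom hpre
  obtain ⟨hne, hpos⟩ := hpre
  unfold Spec_parse_k_values parse_k_values parse_k_values_alt
  rw [if_neg hne, if_neg hne]
  -- the sorted list still has only positive elements
  have hpos' : ∀ v ∈ PySem.List.sorted raw (fun x => x) false, 0 < v := by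
    intro v hv
    exact hpos v ((PySem.List.mem_sorted _ _ _ _).1 hv)
  -- A's value = set(sorted raw) in first-occurrence order
  have hA : ((PySem.List.sorted raw (fun x => x) false).foldl
      (fun (st : PySem.Set Int × List Int) value =>
        if PySem.Set.contains st.1 value then st
        else if value ≤ 0 then st
        else (PySem.Set.add st.1 value, st.2 ++ [value]))
      (PySem.Set.empty, [])).2
      = PySem.Set.ofList (PySem.List.sorted raw (fun x => x) false) := by
    rw [show (PySem.Set.empty, ([] : List Int)) = (([] : List Int), ([] : List Int)) from rfl,
        loopA_eq_foldl_add _ hpos' []]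
    rfl
  rw [hA]
  set ds := PySem.Set.ofList (PySem.List.sorted raw (fun x => x) false) with hds
  -- ds is strictly increasing: sublist of the sorted list, plus nodup
  have hsub : List.Sublist ds (PySem.List.sorted raw (fun x => x) false) := by
    simpa using foldl_add_sublist (PySem.List.sorted raw (fun x => x) false) []
  have hle : ds.Pairwise (fun a b => a ≤ b) :=
    (PySem.List.sorted_pairwise raw (fun x => x)).sublist hsub
  have hne' : ds.Pairwise (fun a b : Int => a ≠ b) := PySem.Set.nodup_ofList _
  have hlt : ds.Pairwise (fun a b : Int => a < b) :=
    (hle.and hne').imp (fun h => lt_of_le_of_ne h.1 h.2)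
  -- B's min-guard does not fire: min raw = some m with 0 < m
  cases hmin : PySem.List.min? raw (fun x => x) with
  | none =>
    exact absurd ((PySem.List.min?_eq_none_iff raw (fun x => x)).1 hmin) hne
  | some m =>
    have hm : 0 < m := hpos m (PySem.List.min?_mem hmin)
    simp only [if_neg (by omega : ¬ m ≤ 0)]
    -- finally: A's result ds = B's quicksort result, both strictly increasing, same members
    refine eq_of_mem_iff_pairwise_lt ds (qsortUnique raw) ?_ hlt (pairwise_qsortUnique raw)
    intro a
    rw [mem_qsortUnique]
    simp [hds, PySem.Set.mem_ofList, PySem.List.mem_sorted]
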